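-- pv_equiv track=rewrite | github.com/TheDavibob/AOC2021 | 2022/day18.py | outside_count
-- ===== SOURCE A (Python) =====
-- def outside_count(voxels, outside):
--     exterior_sides = 0
--     for voxel in voxels:
--         for delta in range(3):
--             for sign in (-1, 1):
--                 change = [0, 0, 0]
--                 change[delta] = sign
--
--                 scan_point = tuple(
--                     v + j for v, j in zip(voxel, change)
--                 )
--
--                 if scan_point in outside:
--                     exterior_sides += 1
--
--     return exterior_sides
-- ===== SOURCE B (Python) =====
-- def _matches(pts, ext):
--     # two-pointer scan over two sorted lists; pts may hold duplicates, ext holds none: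
--     # counts elements of pts (with multiplicity) that occur in ext
--     count = 0
--     i = j = 0
--     while i < len(pts) and j < len(ext):
--         if pts[i] < ext[j]:
--             i += 1
--         elif ext[j] < pts[i]:
--             j += 1
--         else:
--             count += 1
--             i += 1
--     return count
--
--
-- def outside_count(voxels, outside):
--     # Sort-and-merge instead of membership scans: sort the deduplicated
--     # exterior once; for each of the 6 axis shifts, sort the shifted voxels and
--     # count matches against the exterior with a linear two-pointer merge.
--     ext = sorted(set(outside))
--     total = 0
--     for dx, dy, dz in ((1, 0, 0), (-1, 0, 0), (0, 1, 0), (0, -1, 0), (0, 0, 1), (0, 0, -1)):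
--         pts = sorted((x + dx, y + dy, z + dz) for x, y, z in voxels)
--         total += _matches(pts, ext)
--     return total
-- ===== Notes on version B (the rewrite author's own statement) =====
-- stated objective: alternative
-- what changed: A runs a linear membership scan of `outside` for each of the 6 neighbours of every voxel; B instead sorts the deduplicated exterior once and, per axis shift, sorts the shifted voxels and counts matches with a linear two-pointer merge - no membership tests or hashing at all.
import Mathlib
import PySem

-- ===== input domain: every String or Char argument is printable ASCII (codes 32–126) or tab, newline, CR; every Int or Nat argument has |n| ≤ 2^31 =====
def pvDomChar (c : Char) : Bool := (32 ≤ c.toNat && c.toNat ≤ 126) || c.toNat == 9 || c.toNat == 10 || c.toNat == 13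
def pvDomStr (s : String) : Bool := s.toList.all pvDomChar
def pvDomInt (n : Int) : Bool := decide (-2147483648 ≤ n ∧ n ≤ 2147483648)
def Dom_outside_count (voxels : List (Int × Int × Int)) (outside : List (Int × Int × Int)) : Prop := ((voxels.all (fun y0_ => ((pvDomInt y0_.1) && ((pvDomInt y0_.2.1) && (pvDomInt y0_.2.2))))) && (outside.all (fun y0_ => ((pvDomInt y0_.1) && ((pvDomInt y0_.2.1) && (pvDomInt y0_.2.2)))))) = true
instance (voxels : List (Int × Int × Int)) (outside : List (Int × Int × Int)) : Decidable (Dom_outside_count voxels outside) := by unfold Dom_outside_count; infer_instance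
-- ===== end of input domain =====

-- B replaces A's nested membership scans by sort-and-merge: dedup+sort the exterior once,
-- sort the shifted voxels per axis shift, and count matches with a linear two-pointer merge
-- (objective: alternative).

-- ===== PORT A =====
def outside_count (voxels : List (Int × Int × Int)) (outside : List (Int × Int × Int)) : Int :=
  voxels.foldl (fun exterior_sides voxel =>
    (PySem.List.pyRange 0 3 1).foldl (fun exterior_sides delta =>
      ([-1, 1] : List Int).foldl (fun exterior_sides sign =>
        let change : List Int := ([0, 0, 0] : List Int).set delta.toNat sign
        let scan_point : Int × Int × Int :=
          (voxel.1 + change.getD 0 0, voxel.2.1 + change.getD 1 0, voxel.2.2 + change.getD 2 0)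
        if scan_point ∈ outside then exterior_sides + 1 else exterior_sides)
        exterior_sides) exterior_sides) 0

-- ===== PORT B =====
-- Python's `<` on int 3-tuples: lexicographic comparison, component by component
def pvLexLt (a b : Int × Int × Int) : Bool :=
  decide (a.1 < b.1) || (decide (a.1 = b.1) &&
    (decide (a.2.1 < b.2.1) || (decide (a.2.1 = b.2.1) && decide (a.2.2 < b.2.2))))

-- Source B's `_matches`: the two-pointer while loop over indices i, j, transcribed as the
-- obvious structural recursion consuming the head that the advanced index skips
def pvMatches : List (Int × Int × Int) → List (Int × Int × Int) → Int
  | [], _ => 0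
  | _ :: _, [] => 0
  | a :: as, b :: bs =>
    if pvLexLt a b then pvMatches as (b :: bs)
    else if pvLexLt b a then pvMatches (a :: as) bs
    else 1 + pvMatches as (b :: bs)

-- key realising Python's lexicographic tuple order for the sorted() calls: exact for
-- |coordinates| ≤ 2^32 (every Dom input, even after the ±1 shifts)
def pvPack (p : Int × Int × Int) : Int := p.1 * 2 ^ 80 + p.2.1 * 2 ^ 40 + p.2.2

-- the 6 axis shifts Source B's for-loop iterates over
def pvShifts : List (Int × Int × Int) := [(1, 0, 0), (-1, 0, 0), (0, 1, 0), (0, -1, 0), (0, 0, 1), (0, 0, -1)]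

def outside_count_alt (voxels : List (Int × Int × Int)) (outside : List (Int × Int × Int)) : Int :=
  let ext := PySem.List.sorted (PySem.Set.ofList outside) pvPack false
  pvShifts.foldl (fun total s =>
    let pts := PySem.List.sorted
      (voxels.map (fun v => (v.1 + s.1, v.2.1 + s.2.1, v.2.2 + s.2.2))) pvPack false
    total + pvMatches pts ext) 0

-- ===== PRECONDITION & SPEC =====
def Spec_outside_count (voxels : List (Int × Int × Int)) (outside : List (Int × Int × Int)) (out : Int) : Prop := out = outside_count_alt voxels outside
instance (voxels : List (Int × Int × Int)) (outside : List (Int × Int × Int)) (out : Int) : Decidable (Spec_outside_count voxels outside out) := by unfold Spec_outside_count; infer_instance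

-- ===== CLAIM (what is proved, stated in full; the proofs are below) =====
def Claim_equal_outside_count : Prop := ∀ (voxels : List (Int × Int × Int)) (outside : List (Int × Int × Int)), Dom_outside_count voxels outside → Spec_outside_count voxels outside (outside_count voxels outside)

-- ===== LEMMAS AND PROOFS =====

-- the per-voxel count of exterior neighbours, in the normal form A's body reduces to
def pvInd (out : List (Int × Int × Int)) (v : Int × Int × Int) : Int :=
  (if (v.1 + -1, v.2) ∈ out then 1 else 0) +
  ((if (v.1 + 1, v.2) ∈ out then 1 else 0) +
  ((if (v.1, v.2.1 + -1, v.2.2) ∈ out then 1 else 0) +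
  ((if (v.1, v.2.1 + 1, v.2.2) ∈ out then 1 else 0) +
  ((if (v.1, v.2.1, v.2.2 + -1) ∈ out then 1 else 0) +
  (if (v.1, v.2.1, v.2.2 + 1) ∈ out then 1 else 0)))))

-- A's body, characterised: one addition of pvInd per voxel
lemma pvA_step (outside : List (Int × Int × Int)) (acc : Int) (v : Int × Int × Int) :
    ((PySem.List.pyRange 0 3 1).foldl (fun acc delta =>
      ([-1, 1] : List Int).foldl (fun acc sign =>
        let change : List Int := ([0, 0, 0] : List Int).set delta.toNat sign
        let scan_point : Int × Int × Int :=
          (v.1 + change.getD 0 0, v.2.1 + change.getD 1 0, v.2.2 + change.getD 2 0)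
        if scan_point ∈ outside then acc + 1 else acc)
        acc) acc) = acc + pvInd outside v := by
  have h : PySem.List.pyRange 0 3 1 = [0, 1, 2] := by decide
  have h2 : (2 : Int).toNat = 2 := rfl
  rw [h]
  simp only [List.foldl, List.set, List.getD, List.getElem?_cons_zero, List.getElem?_cons_succ,
    Option.getD_some, Int.toNat_zero, Int.toNat_one, h2, add_zero, pvInd]
  split_ifs <;> omega

lemma pvA_eq (voxels outside : List (Int × Int × Int)) :
    outside_count voxels outside = (voxels.map (pvInd outside)).sum := by
  unfold outside_count
  rw [PySem.List.foldl_congr_mem _ _ (fun acc v => acc + pvInd outside v) _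
    (fun acc x _ => pvA_step outside acc x)]
  rw [PySem.List.foldl_add]
  omega

-- arithmetic characterisation of the lexicographic comparison
lemma pvLexLt_iff (a b : Int × Int × Int) : pvLexLt a b = true ↔
    (a.1 < b.1 ∨ (a.1 = b.1 ∧ (a.2.1 < b.2.1 ∨ (a.2.1 = b.2.1 ∧ a.2.2 < b.2.2)))) := by
  simp [pvLexLt]

lemma pvLexLt_irrefl (a : Int × Int × Int) : pvLexLt a a = false := by
  rw [Bool.eq_false_iff]
  intro h; rw [pvLexLt_iff] at h; omega

lemma pvLexLt_eq_of_not {a b : Int × Int × Int}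
    (h1 : ¬ pvLexLt a b = true) (h2 : ¬ pvLexLt b a = true) : a = b := by
  rw [pvLexLt_iff] at h1 h2
  obtain ⟨a1, a2, a3⟩ := a; obtain ⟨b1, b2, b3⟩ := b
  simp only [Prod.mk.injEq]
  dsimp only at h1 h2
  refine ⟨?_, ?_, ?_⟩ <;> omega

lemma pvLexLt_trans {a b c : Int × Int × Int}
    (h1 : pvLexLt a b = true) (h2 : pvLexLt b c = true) : pvLexLt a c = true := by
  rw [pvLexLt_iff] at *; omega

-- correctness of the two-pointer merge: on a ≤-sorted left list and a <-sorted right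
-- list it counts the left elements (with multiplicity) that occur on the right
lemma pvMatches_eq (as bs : List (Int × Int × Int))
    (ha : as.Pairwise (fun x y => pvLexLt y x = false))
    (hb : bs.Pairwise (fun x y => pvLexLt x y = true)) :
    pvMatches as bs = (as.countP (fun x => decide (x ∈ bs)) : Nat) := by
  induction as, bs using pvMatches.induct with
  | case1 bs => simp [pvMatches]
  | case2 a as => simp [pvMatches]
  | case3 a as b bs hlt ih =>
    have ha' := (List.pairwise_cons.mp ha).2
    have hnotmem : a ∉ b :: bs := by
      intro hmem
      rcases List.mem_cons.mp hmem with rfl | hmem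
      · rw [pvLexLt_irrefl] at hlt; exact Bool.false_ne_true hlt
      · have hba := (List.pairwise_cons.mp hb).1 _ hmem
        have := pvLexLt_trans hlt hba
        rw [pvLexLt_irrefl] at this; exact Bool.false_ne_true this
    rw [pvMatches, if_pos hlt, ih ha' hb, List.countP_cons]
    simp [hnotmem]
  | case4 a as b bs hlt1 hlt2 ih =>
    have hb' := (List.pairwise_cons.mp hb).2
    have hcongr : ∀ x ∈ a :: as, (x ∈ b :: bs) ↔ (x ∈ bs) := by
      intro x hx
      have hbx : pvLexLt b x = true := by
        rcases List.mem_cons.mp hx with rfl | hx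
        · exact hlt2
        · have hax := (List.pairwise_cons.mp ha).1 _ hx
          rcases h : pvLexLt a x with _ | _
          · have : a = x := pvLexLt_eq_of_not (by simp [h]) (by simp [hax])
            exact this ▸ hlt2
          · exact pvLexLt_trans hlt2 h
      have hne : x ≠ b := by
        intro hxb; rw [hxb, pvLexLt_irrefl] at hbx; exact Bool.false_ne_true hbx
      simp [List.mem_cons, hne]
    have hc : List.countP (fun x => decide (x ∈ b :: bs)) (a :: as)
        = List.countP (fun x => decide (x ∈ bs)) (a :: as) :=
      List.countP_congr (fun x hx => by simpa using hcongr x hx)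
    rw [pvMatches, if_neg hlt1, if_pos hlt2, ih ha hb', hc]
  | case5 a as b bs hlt1 hlt2 ih =>
    have heq : a = b := pvLexLt_eq_of_not hlt1 hlt2
    have ha' := (List.pairwise_cons.mp ha).2
    rw [pvMatches, if_neg hlt1, if_neg hlt2, ih ha' hb, List.countP_cons]
    subst heq
    simp
    ring

-- a coordinate bound (satisfied by every Dom input even after the ±1 shifts) making the
-- packed key faithful to the lexicographic order
def pvBnd (p : Int × Int × Int) : Prop :=
  |p.1| ≤ 2 ^ 33 ∧ |p.2.1| ≤ 2 ^ 33 ∧ |p.2.2| ≤ 2 ^ 33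

lemma pvPack_lt {a b : Int × Int × Int} (hA : pvBnd a) (hB : pvBnd b)
    (h : pvLexLt a b = true) : pvPack a < pvPack b := by
  obtain ⟨a1, a2, a3⟩ := a; obtain ⟨b1, b2, b3⟩ := b
  rw [pvLexLt_iff] at h
  obtain ⟨h1, h2, h3⟩ := hA; obtain ⟨g1, g2, g3⟩ := hB
  simp only [pvPack, abs_le] at *
  omega

-- under the bound, a key-nondecreasing pair is not lexicographically decreasing
lemma pvPack_le_of {a b : Int × Int × Int} (hA : pvBnd a) (hB : pvBnd b)
    (h : pvPack a ≤ pvPack b) : pvLexLt b a = false := by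
  rcases hba : pvLexLt b a with _ | _
  · rfl
  · exact absurd h (not_le.mpr (pvPack_lt hB hA hba))

-- the tighter bound Dom itself gives (room for the ±1 shifts below pvBnd)
def pvBndS (p : Int × Int × Int) : Prop :=
  |p.1| ≤ 2 ^ 32 ∧ |p.2.1| ≤ 2 ^ 32 ∧ |p.2.2| ≤ 2 ^ 32

lemma pvBndOfDom {p : Int × Int × Int}
    (h : (pvDomInt p.1 && (pvDomInt p.2.1 && pvDomInt p.2.2)) = true) : pvBndS p := by
  simp only [pvDomInt, Bool.and_eq_true, decide_eq_true_eq] at h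
  simp only [pvBndS, abs_le]
  omega

lemma pvBndS_imp {p : Int × Int × Int} (h : pvBndS p) : pvBnd p := by
  obtain ⟨h1, h2, h3⟩ := h
  simp only [pvBnd, abs_le] at *
  omega

-- the deduplicated sorted exterior is strictly lex-increasing
lemma pvExt_pairwise (outside : List (Int × Int × Int)) (hd : ∀ p ∈ outside, pvBnd p) :
    (PySem.List.sorted (PySem.Set.ofList outside) pvPack false).Pairwise
      (fun x y => pvLexLt x y = true) := by
  have hperm := PySem.List.sorted_perm (PySem.Set.ofList outside) pvPack false
  have hnd : (PySem.List.sorted (PySem.Set.ofList outside) pvPack false).Nodup :=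
    hperm.nodup_iff.mpr (PySem.Set.nodup_ofList outside)
  have hle := PySem.List.sorted_pairwise (PySem.Set.ofList outside) pvPack
  refine (hle.and hnd).imp_of_mem ?_
  intro a b hma hmb hab
  obtain ⟨h1, h2⟩ := hab
  have hBa : pvBnd a := hd a ((PySem.Set.mem_ofList outside a).mp (hperm.mem_iff.mp hma))
  have hBb : pvBnd b := hd b ((PySem.Set.mem_ofList outside b).mp (hperm.mem_iff.mp hmb))
  have hba := pvPack_le_of hBa hBb h1
  rcases hab' : pvLexLt a b with _ | _
  · exact absurd (pvLexLt_eq_of_not (by simp [hab']) (by simp [hba])) h2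
  · rfl

-- any Dom-bounded list sorted by the packed key is lex-nondecreasing
lemma pvPts_pairwise (xs : List (Int × Int × Int)) (hd : ∀ p ∈ xs, pvBnd p) :
    (PySem.List.sorted xs pvPack false).Pairwise (fun x y => pvLexLt y x = false) := by
  have hperm := PySem.List.sorted_perm xs pvPack false
  refine (PySem.List.sorted_pairwise xs pvPack).imp_of_mem ?_
  intro a b hma hmb h1
  exact pvPack_le_of (hd a (hperm.mem_iff.mp hma)) (hd b (hperm.mem_iff.mp hmb)) h1

-- one merge of B = one membership-count over the voxels, shifted by (s1, s2, s3)
lemma pvMatches_count (voxels outside : List (Int × Int × Int)) (s1 s2 s3 : Int)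
    (hv : ∀ p ∈ voxels, pvBndS p) (ho : ∀ p ∈ outside, pvBnd p)
    (hs : |s1| ≤ 1 ∧ |s2| ≤ 1 ∧ |s3| ≤ 1) :
    pvMatches
      (PySem.List.sorted (voxels.map (fun v => (v.1 + s1, v.2.1 + s2, v.2.2 + s3))) pvPack false)
      (PySem.List.sorted (PySem.Set.ofList outside) pvPack false)
      = (voxels.countP (fun v => decide ((v.1 + s1, v.2.1 + s2, v.2.2 + s3) ∈ outside)) : Nat) := by
  have hv' : ∀ p ∈ voxels.map (fun v => (v.1 + s1, v.2.1 + s2, v.2.2 + s3)), pvBnd p := by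
    intro p hp
    obtain ⟨v, hvmem, rfl⟩ := List.mem_map.mp hp
    obtain ⟨h1, h2, h3⟩ := hv v hvmem
    simp only [pvBnd, pvBndS, abs_le] at *
    omega
  rw [pvMatches_eq _ _ (pvPts_pairwise _ hv') (pvExt_pairwise _ ho)]
  congr 1
  have hext : ∀ x : Int × Int × Int,
      (x ∈ PySem.List.sorted (PySem.Set.ofList outside) pvPack false) ↔ x ∈ outside := by
    intro x
    rw [PySem.List.mem_sorted, PySem.Set.mem_ofList]
  rw [(PySem.List.sorted_perm (voxels.map (fun v => (v.1 + s1, v.2.1 + s2, v.2.2 + s3)))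
        pvPack false).countP_eq, List.countP_map]
  exact List.countP_congr (fun v _ => by simpa using hext _)

-- transposing the sums: A's per-voxel 6-indicator sum equals the six per-shift counts
lemma pvFinal (voxels outside : List (Int × Int × Int)) :
    (voxels.map (pvInd outside)).sum
      = (voxels.countP (fun v => decide ((v.1 + 1, v.2.1 + 0, v.2.2 + 0) ∈ outside)) : Nat)
      + (voxels.countP (fun v => decide ((v.1 + -1, v.2.1 + 0, v.2.2 + 0) ∈ outside)) : Nat)
      + (voxels.countP (fun v => decide ((v.1 + 0, v.2.1 + 1, v.2.2 + 0) ∈ outside)) : Nat)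
      + (voxels.countP (fun v => decide ((v.1 + 0, v.2.1 + -1, v.2.2 + 0) ∈ outside)) : Nat)
      + (voxels.countP (fun v => decide ((v.1 + 0, v.2.1 + 0, v.2.2 + 1) ∈ outside)) : Nat)
      + (voxels.countP (fun v => decide ((v.1 + 0, v.2.1 + 0, v.2.2 + -1) ∈ outside)) : Nat) := by
  induction voxels with
  | nil => simp
  | cons v vs ih =>
    obtain ⟨x, y, z⟩ := v
    simp only [List.map_cons, List.sum_cons, List.countP_cons, ih, pvInd,
      decide_eq_true_eq, add_zero]
    push_cast
    split_ifs <;> ring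

-- ===== VERDICT (by name: the statement is the Claim_ definition above) =====
theorem outside_count_spec : Claim_equal_outside_count := by
  intro voxels outside hdom
  unfold Dom_outside_count at hdom
  simp only [Bool.and_eq_true, List.all_eq_true] at hdom
  have hv : ∀ p ∈ voxels, pvBndS p := fun p hp => pvBndOfDom (by simpa using hdom.1 p hp)
  have ho : ∀ p ∈ outside, pvBnd p := fun p hp => pvBndS_imp (pvBndOfDom (by simpa using hdom.2 p hp))
  unfold Spec_outside_count
  rw [pvA_eq]
  unfold outside_count_alt
  simp only [pvShifts, List.foldl]
  rw [pvMatches_count voxels outside 1 0 0 hv ho (by norm_num),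
    pvMatches_count voxels outside (-1) 0 0 hv ho (by norm_num),
    pvMatches_count voxels outside 0 1 0 hv ho (by norm_num),
    pvMatches_count voxels outside 0 (-1) 0 hv ho (by norm_num),
    pvMatches_count voxels outside 0 0 1 hv ho (by norm_num),
    pvMatches_count voxels outside 0 0 (-1) hv ho (by norm_num)]
  rw [pvFinal voxels outside]
  ring
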